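-- pv_equiv track=rewrite | github.com/j-void/LeetCode | 140_WordBreak2.py | wordBreak
-- ===== SOURCE A (Python) =====
-- from typing import List
--
-- def wordBreak(s: str, wordDict: List[str]) -> List[str]:
--     if not s or not wordDict:
--         return []
--     wordDict = set(wordDict)
--     output = []
--     def helper(s, out):
--         if not s:
--             output.append(out)
--         for i in range(len(s)):
--             if s[:i+1] in wordDict:
--                 out_new = out+" "+s[:i+1] if out else s[:i+1]
--                 helper(s[i+1:], out_new)
--     helper(s, "")
--     return output
-- ===== SOURCE B (Python) =====
-- def wordBreak(s, wordDict):
--     if not s or not wordDict: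
--         return []
--     words = set(wordDict)
--     n = len(s)
--     # memo[d] holds all sentences for the suffix s[i+d:], built bottom-up from i = n down to 0
--     memo = [[""]]  # suffix s[n:]: the single empty sentence
--     for i in range(n - 1, -1, -1):
--         res = []
--         for k in range(1, n - i + 1):  # word length k; suffix s[i+k:] sits at memo[k-1]
--             w = s[i:i + k]
--             if w in words:
--                 for tail in memo[k - 1]:
--                     res.append(w if not tail else w + " " + tail)
--         memo.insert(0, res)
--     return memo[0]
-- ===== Notes on version B (the rewrite author's own statement) =====
-- stated objective: alternative
-- what changed: Replaces A's top-down DFS, which re-searches the same suffix once per path reaching it, by a bottom-up dynamic program that computes the sentence list of every suffix exactly once in a memo array, combining each dictionary prefix with the memoized tails in the same increasing-prefix-length order; on large inputs both are dominated by the exponential output itself, so no speed is claimed.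
import Mathlib
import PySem

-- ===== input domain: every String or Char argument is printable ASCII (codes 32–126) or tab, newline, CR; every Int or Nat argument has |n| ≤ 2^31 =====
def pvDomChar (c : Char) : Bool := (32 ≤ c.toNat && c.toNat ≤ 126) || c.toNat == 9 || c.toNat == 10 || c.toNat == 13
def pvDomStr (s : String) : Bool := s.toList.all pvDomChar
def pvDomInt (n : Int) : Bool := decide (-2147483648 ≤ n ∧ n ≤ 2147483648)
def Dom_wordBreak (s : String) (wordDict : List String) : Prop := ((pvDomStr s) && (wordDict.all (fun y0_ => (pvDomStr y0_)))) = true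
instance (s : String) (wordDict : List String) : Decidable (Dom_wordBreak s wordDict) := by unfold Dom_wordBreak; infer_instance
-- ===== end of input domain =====

-- B replaces A's top-down DFS re-exploration of suffixes by a bottom-up memo of the
-- sentences of every suffix (objective: alternative; the return values are proved identical).

-- ===== PORT A =====
-- helper(s, out): appends `out` when s is empty, then tries every nonempty prefix.
def wordBreakHelper (words : List (List Char)) (cs : List Char) (out : List Char) : List (List Char) :=
  (List.range cs.length).attach.foldl
    (fun acc x =>
      if cs.take (x.1 + 1) ∈ words then
        acc ++ wordBreakHelper words (cs.drop (x.1 + 1))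
          (if out = [] then cs.take (x.1 + 1) else out ++ ' ' :: cs.take (x.1 + 1))
      else acc)
    (if cs = [] then [out] else [])
termination_by cs.length
decreasing_by
  have hx := List.mem_range.mp x.2
  simp only [List.length_drop]
  omega

def wordBreak (s : String) (wordDict : List String) : List String :=
  if s.toList = [] ∨ wordDict = [] then []
  else (wordBreakHelper (PySem.Set.ofList (wordDict.map String.toList)) s.toList []).map String.ofList

-- ===== PORT B =====
-- the body of Source B's outer loop: all sentences of the suffix s[i:], reading the sentences
-- of the later suffixes s[i+k:] off memo[k-1]
def altInner (words : List (List Char)) (cs : List Char) (memo : List (List (List Char))) (i : Int) : List (List Char) :=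
  (PySem.List.pyRange 1 ((cs.length : Int) - i + 1) 1).foldl
    (fun res k =>
      let w := PySem.List.slice cs (some i) (some (i + k))
      if w ∈ words then
        res ++ (PySem.List.pyGetD memo (k - 1) []).map
          (fun tail => if tail = [] then w else w ++ ' ' :: tail)
      else res)
    []

def wordBreak_alt (s : String) (wordDict : List String) : List String :=
  if s.toList = [] ∨ wordDict = [] then []
  else
    let cs := s.toList
    let words := PySem.Set.ofList (wordDict.map String.toList)
    let memo :=
      (PySem.List.pyRange ((cs.length : Int) - 1) (-1) (-1)).foldl
        (fun memo i => altInner words cs memo i :: memo) [[[]]]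
    (PySem.List.pyGetD memo 0 []).map String.ofList

-- ===== PRECONDITION & SPEC =====
def Spec_wordBreak (s : String) (wordDict : List String) (out : List String) : Prop := out = wordBreak_alt s wordDict
instance (s : String) (wordDict : List String) (out : List String) : Decidable (Spec_wordBreak s wordDict out) := by unfold Spec_wordBreak; infer_instance

-- ===== CLAIM (what is proved, stated in full; the proofs are below) =====
def Claim_equal_wordBreak : Prop := ∀ (s : String) (wordDict : List String), Dom_wordBreak s wordDict → Spec_wordBreak s wordDict (wordBreak s wordDict)

-- ===== LEMMAS AND PROOFS =====

-- "out + sep + t" as A builds it: glue the sentence-so-far to a later sentence t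
def glue (out t : List Char) : List Char :=
  if t = [] then out else if out = [] then t else out ++ ' ' :: t

-- the sentences of the suffix cs.drop m, …, cs.drop (m + (length - m)), as Source B's memo holds them
def memoFor (words : List (List Char)) (cs : List Char) (m : Nat) : List (List (List Char)) :=
  (List.range (cs.length - m + 1)).map (fun d => wordBreakHelper words (cs.drop (m + d)) [])

theorem foldl_append_ite {α β : Type} (p : α → Prop) [DecidablePred p] (g : α → List β)
    (l : List α) (init : List β) :
    l.foldl (fun acc x => if p x then acc ++ g x else acc) init
      = init ++ l.flatMap (fun x => if p x then g x else []) := by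
  have h : (fun (acc : List β) x => if p x then acc ++ g x else acc)
      = fun acc x => acc ++ (if p x then g x else []) := by
    funext acc x; split <;> simp
  rw [h, PySem.List.foldl_append_eq_flatMap]

theorem helper_eq_flatMap (words : List (List Char)) (cs : List Char) (out : List Char) :
    wordBreakHelper words cs out =
      (if cs = [] then [out] else []) ++
      (List.range cs.length).flatMap (fun i =>
        if cs.take (i + 1) ∈ words then
          wordBreakHelper words (cs.drop (i + 1))
            (if out = [] then cs.take (i + 1) else out ++ ' ' :: cs.take (i + 1))
        else []) := by
  rw [wordBreakHelper]
  rw [List.foldl_attach (f := fun (acc : List (List Char)) i =>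
        if cs.take (i + 1) ∈ words then
          acc ++ wordBreakHelper words (cs.drop (i + 1))
            (if out = [] then cs.take (i + 1) else out ++ ' ' :: cs.take (i + 1))
        else acc)]
  rw [foldl_append_ite (fun i => cs.take (i + 1) ∈ words)]

theorem glue_assoc (out w t : List Char) (hw : w ≠ []) :
    glue (glue out w) t = glue out (glue w t) := by
  unfold glue
  by_cases ht : t = [] <;> by_cases hout : out = [] <;> simp [ht, hout, hw]

theorem helper_map_glue (words : List (List Char)) :
    ∀ (cs out : List Char),
      wordBreakHelper words cs out = (wordBreakHelper words cs []).map (glue out) := by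
  have main : ∀ (n : Nat) (cs : List Char), cs.length = n → ∀ (out : List Char),
      wordBreakHelper words cs out = (wordBreakHelper words cs []).map (glue out) := by
    intro n
    induction n using Nat.strong_induction_on with
    | _ n IH =>
      intro cs hlen out
      rw [helper_eq_flatMap, helper_eq_flatMap words cs [], List.map_append, List.map_flatMap]
      congr 1
      · by_cases hcs : cs = [] <;> simp [hcs, glue]
      · apply List.flatMap_congr
        intro i hi
        have hi' : i < cs.length := List.mem_range.mp hi
        have hcs : cs ≠ [] := by intro h; simp [h] at hi'
        have hw : cs.take (i + 1) ≠ [] := by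
          rw [Ne, List.take_eq_nil_iff]
          rintro (h | h) <;> simp_all
        have hd : (cs.drop (i + 1)).length < n := by
          rw [List.length_drop]; omega
        by_cases hmem : cs.take (i + 1) ∈ words
        · simp only [hmem, if_true]
          rw [IH _ hd (cs.drop (i + 1)) rfl
                (if out = [] then cs.take (i + 1) else out ++ ' ' :: cs.take (i + 1)),
              IH _ hd (cs.drop (i + 1)) rfl (cs.take (i + 1)), List.map_map]
          apply List.map_congr_left
          intro t _
          show glue (if out = [] then cs.take (i + 1) else out ++ ' ' :: cs.take (i + 1)) t
              = glue out (glue (cs.take (i + 1)) t)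
          rw [← glue_assoc out (cs.take (i + 1)) t hw]
          congr 1
          simp [glue, hw]
        · simp [hmem]
  intro cs out
  exact main cs.length cs rfl out

theorem inner_eq (words : List (List Char)) (cs : List Char) (m : Nat) (hm : m < cs.length) :
    altInner words cs (memoFor words cs (m + 1)) (m : Int)
      = wordBreakHelper words (cs.drop m) [] := by
  unfold altInner
  rw [PySem.List.pyRange_one,
      show ((cs.length : Int) - (m : Int) + 1 - 1).toNat = cs.length - m from by omega,
      List.foldl_map]
  rw [foldl_append_ite
        (fun j : Nat => PySem.List.slice cs (some (m : Int)) (some ((m : Int) + (1 + (j : Int)))) ∈ words)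
        (fun j : Nat =>
          (PySem.List.pyGetD (memoFor words cs (m + 1)) ((1 + (j : Int)) - 1) []).map
            (fun tail => if tail = [] then PySem.List.slice cs (some (m : Int)) (some ((m : Int) + (1 + (j : Int))))
              else PySem.List.slice cs (some (m : Int)) (some ((m : Int) + (1 + (j : Int)))) ++ ' ' :: tail))]
  rw [helper_eq_flatMap]
  have hne : cs.drop m ≠ [] := by rw [Ne, List.drop_eq_nil_iff]; omega
  rw [if_neg hne, List.length_drop, List.nil_append, List.nil_append]
  apply List.flatMap_congr
  intro j hj
  have hj' : j < cs.length - m := List.mem_range.mp hj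
  have hcast : ((m : Int) + (1 + (j : Int))) = ((m : Int) + ((j + 1 : Nat) : Int)) := by push_cast; ring
  have hsl : PySem.List.slice cs (some (m : Int)) (some ((m : Int) + (1 + (j : Int))))
      = (cs.drop m).take (j + 1) := by
    rw [hcast, PySem.List.slice_natCast_add]
  have hget : PySem.List.pyGetD (memoFor words cs (m + 1)) ((1 + (j : Int)) - 1) []
      = wordBreakHelper words (cs.drop (m + 1 + j)) [] := by
    rw [show (1 + (j : Int)) - 1 = ((j : Nat) : Int) from by ring,
        PySem.List.pyGetD_natCast]
    unfold memoFor
    rw [PySem.List.getD_map_range _ _ _ _ (by omega)]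
  have hw : (cs.drop m).take (j + 1) ≠ [] := by
    rw [Ne, List.take_eq_nil_iff]
    rintro (h | h) <;> simp_all
  rw [hsl, hget]
  by_cases hmem : (cs.drop m).take (j + 1) ∈ words
  · rw [if_pos hmem, if_pos hmem, if_pos rfl, List.drop_drop,
        show m + (j + 1) = m + 1 + j from by omega,
        helper_map_glue words (cs.drop (m + 1 + j)) ((cs.drop m).take (j + 1))]
    apply List.map_congr_left
    intro t _
    simp [glue, hw]
  · rw [if_neg hmem, if_neg hmem]

theorem helper_nil (words : List (List Char)) (out : List Char) :
    wordBreakHelper words [] out = [out] := by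
  rw [helper_eq_flatMap]; simp

theorem memoFor_cons (words : List (List Char)) (cs : List Char) (m : Nat) (hm : m < cs.length) :
    memoFor words cs m = wordBreakHelper words (cs.drop m) [] :: memoFor words cs (m + 1) := by
  unfold memoFor
  have h : cs.length - m + 1 = (cs.length - (m + 1) + 1) + 1 := by omega
  rw [h, List.range_succ_eq_map, List.map_cons, List.map_map]
  congr 1
  apply List.map_congr_left
  intro d _
  show wordBreakHelper words (cs.drop (m + Nat.succ d)) [] = wordBreakHelper words (cs.drop (m + 1 + d)) []
  have : m + Nat.succ d = m + 1 + d := by omega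
  rw [this]

theorem outer_inv (words : List (List Char)) (cs : List Char) :
    ∀ m, m ≤ cs.length →
      (PySem.List.pyRange ((m : Int) - 1) (-1) (-1)).foldl
        (fun memo i => altInner words cs memo i :: memo) (memoFor words cs m)
        = memoFor words cs 0 := by
  intro m
  induction m with
  | zero =>
    intro _
    have h0 : ((0 : Nat) : Int) - 1 = (-1 : Int) := by norm_num
    rw [h0, PySem.List.pyRange_neg_one_eq_nil (le_refl _), List.foldl_nil]
  | succ m IHm =>
    intro hm
    have h1 : ((m + 1 : Nat) : Int) - 1 = (m : Int) := by push_cast; ring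
    rw [h1, PySem.List.pyRange_neg_one_cons (by omega)]
    simp only [List.foldl_cons]
    rw [inner_eq words cs m (by omega), ← memoFor_cons words cs m (by omega)]
    exact IHm (by omega)

theorem alt_eq_helper (words : List (List Char)) (cs : List Char) :
    PySem.List.pyGetD
      ((PySem.List.pyRange ((cs.length : Int) - 1) (-1) (-1)).foldl
        (fun memo i => altInner words cs memo i :: memo) [[[]]]) 0 []
      = wordBreakHelper words cs [] := by
  have h0 : [([] : List Char)] :: ([] : List (List (List Char))) = memoFor words cs cs.length := by
    unfold memoFor
    simp [List.drop_length, helper_nil]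
  rw [show ([[([] : List Char)]] : List (List (List Char))) = [([] : List Char)] :: [] from rfl, h0,
      outer_inv words cs cs.length (le_refl _), PySem.List.pyGetD_zero]
  unfold memoFor
  rw [PySem.List.getD_map_range _ _ _ _ (by omega)]
  simp

-- ===== VERDICT (by name: the statement is the Claim_ definition above) =====
theorem wordBreak_spec : Claim_equal_wordBreak := by
  intro s wordDict _
  unfold Spec_wordBreak wordBreak wordBreak_alt
  split
  · rfl
  · simp only []
    rw [alt_eq_helper]
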